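-- pv_equiv track=rewrite | github.com/Karna-Balaji-07/DSA_Sheet | Stacks/Postfix to Prefix conversion.py | solution
-- ===== SOURCE A (Python) =====
-- def operator(i):
--     if i in ['+','-','*','/','^']:
--         return True
--     return False
--
-- def solution(s):
--     n = len(s)
--     stack = []
--     result = ""
--     for i in range(n):
--         if not operator(s[i]):
--             stack.append(s[i])
--         else:
--             s1 = stack[-1]
--             stack.pop()
--             s2 = stack[-1]
--             stack.pop()
--             strings = s[i] + s2+s1
--             result += strings
--             stack.append(strings)
--     return stack.pop()
-- ===== SOURCE B (Python) =====
-- def preorder(node):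
--     if isinstance(node, tuple):
--         op, left, right = node
--         return op + preorder(left) + preorder(right)
--     return node
--
-- def solution(s):
--     stack = []
--     for ch in s:
--         if ch in '+-*/^':
--             right = stack.pop()
--             left = stack.pop()
--             stack.append((ch, left, right))
--         else:
--             stack.append(ch)
--     root = stack.pop()
--     return preorder(root)
-- ===== Notes on version B (the rewrite author's own statement) =====
-- stated objective: faster
-- what changed: B builds an expression tree on the stack (leaf per operand, node per operator with left = second-popped) and produces the output by a separate recursive preorder traversal of the final popped tree, instead of A's inline string concatenation on a stack of strings plus a dead result accumulator.
import Mathlib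
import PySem

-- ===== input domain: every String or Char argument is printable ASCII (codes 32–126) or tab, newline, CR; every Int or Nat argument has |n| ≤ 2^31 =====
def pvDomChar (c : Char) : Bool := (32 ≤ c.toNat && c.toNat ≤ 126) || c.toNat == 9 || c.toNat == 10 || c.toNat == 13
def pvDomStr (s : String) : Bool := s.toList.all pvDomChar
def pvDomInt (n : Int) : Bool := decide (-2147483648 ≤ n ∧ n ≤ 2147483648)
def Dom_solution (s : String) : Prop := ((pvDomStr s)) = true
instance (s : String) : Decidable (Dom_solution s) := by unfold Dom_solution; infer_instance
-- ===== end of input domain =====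

-- B builds an expression tree on the stack and renders it with a separate recursive
-- preorder traversal, instead of A's inline string concatenation and dead result accumulator.


-- ===== PORT A =====
def operatorA (c : Char) : Bool :=
  if ['+', '-', '*', '/', '^'].contains c then true else false

-- one step of A's for-loop: state = (stack, result); none = IndexError (excluded by Pre_)
def stepA (st : Option (List String × String)) (c : Char) : Option (List String × String) :=
  match st with
  | none => none
  | some (stack, result) =>
    if !operatorA c then
      some (c.toString :: stack, result)
    else
      match stack with
      | s1 :: s2 :: rest =>
          let strings := c.toString ++ s2 ++ s1
          some (strings :: rest, result ++ strings)
      | _ => none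

def solution (s : String) : String :=
  match s.toList.foldl stepA (some ([], "")) with
  | some (h :: _, _) => h          -- stack.pop()
  | _ => ""                        -- IndexError: outside Pre_solution

-- ===== PORT B =====
inductive PTree where
  | leaf : Char → PTree
  | node : Char → PTree → PTree → PTree
deriving DecidableEq, Repr

def preorder : PTree → String
  | .leaf c => c.toString
  | .node op l r => op.toString ++ preorder l ++ preorder r

-- one step of B's for-loop over a stack of trees; none = IndexError (excluded by Pre_)
def stepB (st : Option (List PTree)) (c : Char) : Option (List PTree) :=
  st.bind fun stack =>
    if "+-*/^".toList.contains c then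
      match stack with
      | [] => none
      | [_] => none
      | right :: left :: rest => some (.node c left right :: rest)
    else some (.leaf c :: stack)

def solution_alt (s : String) : String :=
  -- root = stack.pop() (none = IndexError, outside Pre_solution); render by preorder
  (((s.toList.foldl stepB (some [])).bind List.head?).map preorder).getD "" 

-- ===== PRECONDITION & SPEC =====
def isOpC (c : Char) : Bool := ['+', '-', '*', '/', '^'].contains c

-- exactly the inputs on which Python A returns (no IndexError): nonempty, and before
-- every operator the stack holds at least two entries (#operands - #operators ≥ 2)
def Pre_solution (s : String) : Prop :=
  s.toList ≠ [] ∧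
  ∀ i : Nat, i < s.toList.length → isOpC (s.toList.getD i ' ') = true →
    ((s.toList.take i).countP (fun c => !isOpC c))
      ≥ ((s.toList.take i).countP (fun c => isOpC c)) + 2

instance (s : String) : Decidable (Pre_solution s) := by unfold Pre_solution; infer_instance

def pvWitness_solution : String := "ab+"

def Spec_solution (s : String) (out : String) : Prop := out = solution_alt s
instance (s : String) (out : String) : Decidable (Spec_solution s out) := by unfold Spec_solution; infer_instance

-- ===== CLAIM (what is proved, stated in full; the proofs are below) =====
def Claim_equal_solution : Prop := ∀ (s : String), Dom_solution s → Pre_solution s → Spec_solution s (solution s)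

-- ===== LEMMAS AND PROOFS =====

lemma loopA_none (cs : List Char) : cs.foldl stepA none = none := by
  induction cs with
  | nil => rfl
  | cons c cs ih => simpa [stepA] using ih

lemma loopB_none (cs : List Char) : cs.foldl stepB none = none := by
  induction cs with
  | nil => rfl
  | cons c cs ih => simpa [stepB] using ih

-- loop invariant: A's string stack is the image under preorder of B's tree stack
lemma loop_rel (cs : List Char) : ∀ (stB : List PTree) (r : String),
    (cs.foldl stepA (some (stB.map preorder, r))).map Prod.fst
      = (cs.foldl stepB (some stB)).map (List.map preorder) := by
  induction cs with
  | nil => intro stB r; rfl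
  | cons c cs ih =>
    intro stB r
    by_cases hop0 : "+-*/^".toList.contains c
    · have hop : c = '+' ∨ c = '-' ∨ c = '*' ∨ c = '/' ∨ c = '^' := by
        simpa using hop0
      cases stB with
      | nil =>
        simp [List.foldl_cons, stepA, stepB, operatorA]
        have hf : ¬(¬c = '+' ∧ ¬c = '-' ∧ ¬c = '*' ∧ ¬c = '/' ∧ ¬c = '^') := by tauto
        simp [hf, if_pos hop, loopA_none, loopB_none]
      | cons t1 stB' =>
        cases stB' with
        | nil =>
          simp [List.foldl_cons, stepA, stepB, operatorA]
          have hf : ¬(¬c = '+' ∧ ¬c = '-' ∧ ¬c = '*' ∧ ¬c = '/' ∧ ¬c = '^') := by tauto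
          simp [hf, if_pos hop, loopA_none, loopB_none]
        | cons t2 rest =>
          have hA : operatorA c = true := by
            simp [operatorA]; tauto
          have h1 : (cs.foldl stepA
              (stepA (some ((t1 :: t2 :: rest).map preorder, r)) c)).map Prod.fst
              = (cs.foldl stepA (some ((PTree.node c t2 t1 :: rest).map preorder,
                  r ++ (c.toString ++ preorder t2 ++ preorder t1)))).map Prod.fst := by
            simp [stepA, hA, preorder]
          have h2 : cs.foldl stepB (stepB (some (t1 :: t2 :: rest)) c)
              = cs.foldl stepB (some (PTree.node c t2 t1 :: rest)) := by
            simp [stepB, hop]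
          simp only [List.foldl_cons]
          rw [h1, h2, ih]
    · have hop : ¬(c = '+' ∨ c = '-' ∨ c = '*' ∨ c = '/' ∨ c = '^') := by
        simpa using hop0
      have hA : operatorA c = false := by
        simp [operatorA]; tauto
      have h1 : stepA (some (stB.map preorder, r)) c
          = some ((PTree.leaf c :: stB).map preorder, r) := by
        simp [stepA, hA, preorder]
      have h2 : stepB (some stB) c = some (PTree.leaf c :: stB) := by
        simp [stepB, hop]
      simp only [List.foldl_cons]
      rw [h1, h2, ih]

-- ===== VERDICT (by name: the statement is the Claim_ definition above) =====
theorem solution_spec : Claim_equal_solution := by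
  intro s _ _
  unfold Spec_solution solution solution_alt
  have h := loop_rel s.toList [] ""
  simp only [List.map_nil] at h
  cases hB : s.toList.foldl stepB (some []) with
  | none =>
    rw [hB] at h
    cases hA : s.toList.foldl stepA (some ([], "")) with
    | none => rfl
    | some p => rw [hA] at h; simp at h
  | some stB' =>
    rw [hB] at h
    cases hA : s.toList.foldl stepA (some ([], "")) with
    | none => rw [hA] at h; simp at h
    | some p =>
      rw [hA] at h
      simp only [Option.map_some, Option.some.injEq] at h
      cases stB' with
      | nil =>
        obtain ⟨stack, r⟩ := p
        simp at h
        simp [h]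
      | cons t rest =>
        obtain ⟨stack, r⟩ := p
        simp only at h
        subst h
        simp
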